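-- pv_equiv track=rewrite | github.com/jcolinpatrick/kryptos | scripts/transposition/columnar/e_grid31_k4_transposition_01.py | read_columns_boustrophedon
-- ===== SOURCE A (Python) =====
-- def read_columns_boustrophedon(grid, col_order, num_rows=4, num_cols=31):
--     """Read columns alternating top-to-bottom and bottom-to-top."""
--     result = []
--     for i, col in enumerate(col_order):
--         if i % 2 == 0:
--             rows = range(num_rows)
--         else:
--             rows = range(num_rows - 1, -1, -1)
--         for row in rows:
--             if (row, col) in grid:
--                 result.append(grid[(row, col)])
--     return ''.join(result)
-- ===== SOURCE B (Python) =====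
-- def read_columns_boustrophedon(grid, col_order, num_rows=4, num_cols=31):
--     """Read columns alternating top-to-bottom and bottom-to-top."""
--     # indices at which each column appears in col_order (a column may repeat)
--     positions = {}
--     for i, c in enumerate(col_order):
--         positions.setdefault(c, []).append(i)
--     # one pass over the grid's cells: give each cell its linear output position
--     keyed = []
--     for (r, c), v in grid.items():
--         if 0 <= r < num_rows:
--             for i in positions.get(c, []):
--                 pos = r if i % 2 == 0 else num_rows - 1 - r
--                 keyed.append((i * num_rows + pos, v))
--     keyed.sort(key=lambda t: t[0])
--     return ''.join(v for _, v in keyed)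
-- ===== Notes on version B (the rewrite author's own statement) =====
-- stated objective: faster
-- what changed: B inverts the iteration: instead of probing every (row, col) slot of every column for membership, it makes one pass over the grid's own cells, assigns each cell its linear boustrophedon output position (column index times num_rows plus the possibly flipped row), sorts the cells by that key and joins the values.
import Mathlib
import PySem

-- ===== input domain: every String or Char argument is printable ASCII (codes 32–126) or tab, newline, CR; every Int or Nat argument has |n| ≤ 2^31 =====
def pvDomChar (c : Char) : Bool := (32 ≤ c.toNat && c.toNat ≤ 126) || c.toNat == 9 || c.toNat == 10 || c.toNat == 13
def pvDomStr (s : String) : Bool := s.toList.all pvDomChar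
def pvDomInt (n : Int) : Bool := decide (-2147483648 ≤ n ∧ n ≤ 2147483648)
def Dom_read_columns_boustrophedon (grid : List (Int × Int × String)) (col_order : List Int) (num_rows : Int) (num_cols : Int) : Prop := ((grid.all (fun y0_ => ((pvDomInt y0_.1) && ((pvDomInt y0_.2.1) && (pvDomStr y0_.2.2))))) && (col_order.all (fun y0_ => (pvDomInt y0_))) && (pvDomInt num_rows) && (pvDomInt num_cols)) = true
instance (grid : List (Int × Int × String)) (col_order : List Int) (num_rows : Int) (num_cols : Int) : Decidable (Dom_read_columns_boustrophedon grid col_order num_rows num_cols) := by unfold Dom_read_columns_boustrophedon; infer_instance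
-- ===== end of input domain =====

-- B replaces A's probe of every (row, col) slot of every column by a single pass over
-- the grid's own cells, keying each cell with its linear boustrophedon output position
-- and sorting by it; measurably faster when the grid is sparse relative to the slots probed.

-- ===== PORT A =====
def read_columns_boustrophedon (grid : List (Int × Int × String)) (col_order : List Int) (num_rows : Int) (num_cols : Int) : String :=
  let d := PySem.Dict.ofList (grid.map (fun p => ((p.1, p.2.1), p.2.2)))   -- the Python parameter is a dict keyed by (row, col)
  let result : List String :=
    (PySem.List.enumerate col_order).foldl (fun res ic =>
      let rows : List Int :=
        if ic.1 % 2 == 0 then PySem.List.pyRange 0 num_rows 1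
        else PySem.List.pyRange (num_rows - 1) (-1) (-1)
      rows.foldl (fun res row =>
        if d.contains (row, ic.2) then
          res ++ [(d.get? (row, ic.2)).getD ""]   -- grid[(row, col)]; guarded by the contains test
        else res) res) []
  PySem.Str.join "" result

-- ===== PORT B =====
def read_columns_boustrophedon_alt (grid : List (Int × Int × String)) (col_order : List Int) (num_rows : Int) (num_cols : Int) : String :=
  let d := PySem.Dict.ofList (grid.map (fun p => ((p.1, p.2.1), p.2.2)))   -- the Python parameter is a dict keyed by (row, col)
  -- positions.setdefault(c, []).append(i)  ==  positions[c] = positions.get(c, []) + [i]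
  let positions : PySem.Dict Int (List Int) :=
    (PySem.List.enumerate col_order).foldl
      (fun ps ic => ps.modify ic.2 [] (fun l => l ++ [ic.1])) PySem.Dict.empty
  let keyed : List (Int × String) :=
    d.items.foldl (fun acc kv =>
      if 0 ≤ kv.1.1 ∧ kv.1.1 < num_rows then
        (positions.getD kv.1.2 []).foldl (fun acc i =>
          let pos := if i % 2 == 0 then kv.1.1 else num_rows - 1 - kv.1.1
          acc ++ [(i * num_rows + pos, kv.2)]) acc
      else acc) []
  -- keyed.sort(key=lambda t: t[0])
  let sortedK := PySem.List.sorted keyed (fun t => t.1) false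
  PySem.Str.join "" (sortedK.map (fun t => t.2))

-- ===== PRECONDITION & SPEC =====
def Spec_read_columns_boustrophedon (grid : List (Int × Int × String)) (col_order : List Int) (num_rows : Int) (num_cols : Int) (out : String) : Prop := out = read_columns_boustrophedon_alt grid col_order num_rows num_cols
instance (grid : List (Int × Int × String)) (col_order : List Int) (num_rows : Int) (num_cols : Int) (out : String) : Decidable (Spec_read_columns_boustrophedon grid col_order num_rows num_cols out) := by unfold Spec_read_columns_boustrophedon; infer_instance

-- ===== CLAIM (what is proved, stated in full; the proofs are below) =====
def Claim_equal_read_columns_boustrophedon : Prop := ∀ (grid : List (Int × Int × String)) (col_order : List Int) (num_rows : Int) (num_cols : Int), Dom_read_columns_boustrophedon grid col_order num_rows num_cols → Spec_read_columns_boustrophedon grid col_order num_rows num_cols (read_columns_boustrophedon grid col_order num_rows num_cols)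

-- ===== LEMMAS AND PROOFS =====

-- the cell of column-index i, row r, value v, with its linear boustrophedon position
def pvEnt (num_rows i r : Int) (v : String) : Int × String :=
  (i * num_rows + (if i % 2 == 0 then r else num_rows - 1 - r), v)

-- the keyed cells of the column read at index i (column label c), in reading order
def pvColKeyed (d : PySem.Dict (Int × Int) String) (num_rows i c : Int) : List (Int × String) :=
  let base := ((PySem.List.pyRange 0 num_rows 1).filter (fun r => d.contains (r, c))).map
      (fun r => pvEnt num_rows i r ((d.get? (r, c)).getD ""))
  if i % 2 == 0 then base else base.reverse

-- the whole reading, keyed, in reading order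
def pvT (d : PySem.Dict (Int × Int) String) (num_rows : Int) (col_order : List Int) : List (Int × String) :=
  (PySem.List.enumerate col_order).flatMap (fun ic => pvColKeyed d num_rows ic.1 ic.2)

-- ---- A-side: A's accumulator is the reading order, column by column ----
theorem pvInner_even (d : PySem.Dict (Int × Int) String) (num_rows c : Int) (res : List String) (i : Int) (h : (i % 2 == 0) = true) :
    (PySem.List.pyRange 0 num_rows 1).foldl (fun res row =>
      if d.contains (row, c) then res ++ [(d.get? (row, c)).getD ""] else res) res
      = res ++ (pvColKeyed d num_rows i c).map (·.2) := by
  have := PySem.List.foldl_append_if (fun r => d.contains (r, c))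
      (fun r => (d.get? (r, c)).getD "") (PySem.List.pyRange 0 num_rows 1) res
  simpa [pvColKeyed, h, pvEnt, List.map_map, Function.comp] using this

theorem pvInner_odd (d : PySem.Dict (Int × Int) String) (num_rows c : Int) (res : List String) (i : Int) (h : ¬ (i % 2 == 0) = true) :
    (PySem.List.pyRange (num_rows - 1) (-1) (-1)).foldl (fun res row =>
      if d.contains (row, c) then res ++ [(d.get? (row, c)).getD ""] else res) res
      = res ++ (pvColKeyed d num_rows i c).map (·.2) := by
  have hrev : PySem.List.pyRange (num_rows - 1) (-1) (-1)
      = (PySem.List.pyRange 0 num_rows 1).reverse := by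
    have := PySem.List.pyRange_neg_one_eq_reverse (num_rows - 1) (-1)
    simpa using this
  rw [hrev]
  have := PySem.List.foldl_append_if (fun r => d.contains (r, c))
      (fun r => (d.get? (r, c)).getD "") (PySem.List.pyRange 0 num_rows 1).reverse res
  simpa [pvColKeyed, h, pvEnt, List.filter_reverse, List.map_reverse, List.map_map,
    Function.comp] using this

theorem pvOuter (d : PySem.Dict (Int × Int) String) (num_rows : Int) :
    ∀ (l : List Int) (s : Int) (res : List String),
    (PySem.List.enumerate l s).foldl (fun res ic =>
      let rows : List Int :=
        if ic.1 % 2 == 0 then PySem.List.pyRange 0 num_rows 1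
        else PySem.List.pyRange (num_rows - 1) (-1) (-1)
      rows.foldl (fun res row =>
        if d.contains (row, ic.2) then res ++ [(d.get? (row, ic.2)).getD ""] else res) res) res
      = res ++ ((PySem.List.enumerate l s).flatMap (fun ic => pvColKeyed d num_rows ic.1 ic.2)).map (·.2) := by
  intro l
  induction l with
  | nil => intro s res; simp [PySem.List.enumerate]
  | cons c t ih =>
    intro s res
    rw [PySem.List.enumerate_cons]
    simp only [List.foldl_cons, List.flatMap_cons, List.map_append]
    by_cases hs : (s % 2 == 0) = true
    · rw [ih]
      simp [hs, pvInner_even d num_rows c res s hs]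
    · rw [ih]
      simp [hs, pvInner_odd d num_rows c res s hs]

-- ---- B-side: the keyed list, as a flatMap over the dict's items ----
theorem pvPositions (col_order : List Int) (c : Int) :
    ((PySem.List.enumerate col_order).foldl
      (fun ps ic => ps.modify ic.2 [] (fun l => l ++ [ic.1])) PySem.Dict.empty).getD c []
    = ((PySem.List.enumerate col_order).filter (fun ic => ic.2 == c)).map (·.1) := by
  rw [show ((PySem.List.enumerate col_order).foldl
      (fun ps ic => ps.modify ic.2 [] (fun l => l ++ [ic.1])) PySem.Dict.empty)
    = (((PySem.List.enumerate col_order).map (fun ic => (ic.2, ic.1))).foldl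
      (fun ps p => ps.modify p.1 [] (fun l => l ++ [p.2])) PySem.Dict.empty) from by
    rw [List.foldl_map]]
  rw [PySem.Dict.getD_foldl_modify_append]
  simp [List.filter_map, Function.comp_def, List.map_map]

theorem pvKeyed (d : PySem.Dict (Int × Int) String) (num_rows : Int) (col_order : List Int) :
    d.items.foldl (fun acc kv =>
      if 0 ≤ kv.1.1 ∧ kv.1.1 < num_rows then
        ((((PySem.List.enumerate col_order).foldl
            (fun ps ic => ps.modify ic.2 [] (fun l => l ++ [ic.1])) PySem.Dict.empty)).getD kv.1.2 []).foldl (fun acc i =>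
          let pos := if i % 2 == 0 then kv.1.1 else num_rows - 1 - kv.1.1
          acc ++ [(i * num_rows + pos, kv.2)]) acc
      else acc) []
    = d.items.flatMap (fun kv =>
        if 0 ≤ kv.1.1 ∧ kv.1.1 < num_rows then
          (((PySem.List.enumerate col_order).filter (fun ic => ic.2 == kv.1.2)).map (·.1)).map
            (fun i => pvEnt num_rows i kv.1.1 kv.2)
        else []) := by
  have hfun : (fun (acc : List (Int × String)) (kv : (Int × Int) × String) =>
      if 0 ≤ kv.1.1 ∧ kv.1.1 < num_rows then
        ((((PySem.List.enumerate col_order).foldl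
            (fun ps ic => ps.modify ic.2 [] (fun l => l ++ [ic.1])) PySem.Dict.empty)).getD kv.1.2 []).foldl (fun acc i =>
          let pos := if i % 2 == 0 then kv.1.1 else num_rows - 1 - kv.1.1
          acc ++ [(i * num_rows + pos, kv.2)]) acc
      else acc)
    = (fun acc kv => acc ++ (if 0 ≤ kv.1.1 ∧ kv.1.1 < num_rows then
          (((PySem.List.enumerate col_order).filter (fun ic => ic.2 == kv.1.2)).map (·.1)).map
            (fun i => pvEnt num_rows i kv.1.1 kv.2)
        else [])) := by
    funext acc kv
    split_ifs with h
    · rw [pvPositions col_order kv.1.2, PySem.List.foldl_append_singleton_eq_map]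
      simp [pvEnt]
    · simp
  rw [hfun, PySem.List.foldl_append_eq_flatMap]
  simp

-- ---- multiset bookkeeping ----
theorem pvMsumFlatMap {α β : Type} (l : List α) (f : α → List β) :
    ((l.flatMap f : List β) : Multiset β) = (l.map (fun a => ((f a : List β) : Multiset β))).sum := by
  induction l with
  | nil => simp
  | cons x t ih => simp [ih, ← Multiset.coe_add]

theorem pvMsumFilterMap {α β : Type} (l : List α) (p : α → Bool) (f : α → β) :
    (((l.filter p).map f : List β) : Multiset β)
      = (l.map (fun x => if p x then ({f x} : Multiset β) else 0)).sum := by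
  induction l with
  | nil => simp
  | cons x t ih =>
    by_cases h : p x = true
    · simp [h, ih, ← Multiset.cons_coe, ← Multiset.singleton_add]
    · simp [h, ih]

theorem pvMsumSwap {α β γ : Type} (l1 : List α) (l2 : List β) (g : α → β → Multiset γ) :
    (l1.map (fun a => (l2.map (g a)).sum)).sum = (l2.map (fun b => (l1.map (fun a => g a b)).sum)).sum := by
  induction l1 with
  | nil =>
    induction l2 with
    | nil => simp
    | cons b t ih => simpa using ih
  | cons a t ih =>
    simp only [List.map_cons, List.sum_cons, ih]
    clear ih
    induction l2 with
    | nil => simp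
    | cons b t2 ih2 =>
      simp only [List.map_cons, List.sum_cons] at *
      rw [← ih2]
      abel

-- ---- the column Perm: B's filtered items are A's column reading, as multisets ----
theorem pvColKeyed_msum (d : PySem.Dict (Int × Int) String) (hnd : d.keys.Nodup) (num_rows i c : Int) :
    ((pvColKeyed d num_rows i c : List (Int × String)) : Multiset (Int × String))
      = (((d.items.filter (fun kv => kv.1.2 == c && decide (0 ≤ kv.1.1 ∧ kv.1.1 < num_rows))).map
          (fun kv => pvEnt num_rows i kv.1.1 kv.2) : List (Int × String)) : Multiset (Int × String)) := by
  rw [Multiset.coe_eq_coe]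
  have hkeyinj : ∀ (r r' : Int), i * num_rows + (if i % 2 == 0 then r else num_rows - 1 - r)
      = i * num_rows + (if i % 2 == 0 then r' else num_rows - 1 - r') → r = r' := by
    intro r r' h
    by_cases hp : (i % 2 == 0) = true <;> simp [hp] at h <;> omega
  have hbase : (((PySem.List.pyRange 0 num_rows 1).filter (fun r => d.contains (r, c))).map
      (fun r => pvEnt num_rows i r ((d.get? (r, c)).getD ""))).Perm
      ((d.items.filter (fun kv => kv.1.2 == c && decide (0 ≤ kv.1.1 ∧ kv.1.1 < num_rows))).map
          (fun kv => pvEnt num_rows i kv.1.1 kv.2)) := by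
    apply (List.perm_ext_iff_of_nodup ?_ ?_).mpr
    · -- same members
      intro a
      constructor
      · intro ha
        rcases List.mem_map.mp ha with ⟨r, hr, rfl⟩
        rcases List.mem_filter.mp hr with ⟨hrR, hrc⟩
        rcases (PySem.List.mem_pyRange_one).mp hrR with ⟨hr0, hrn⟩
        have hsome : (d.get? (r, c)).isSome := by
          rw [← PySem.Dict.contains_eq_isSome_get?]; exact hrc
        rcases Option.isSome_iff_exists.mp hsome with ⟨v, hv⟩
        refine List.mem_map.mpr ⟨((r, c), v), List.mem_filter.mpr ⟨?_, ?_⟩, ?_⟩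
        · exact PySem.Dict.mem_items_of_get?_eq_some d hv
        · simp
          omega
        · simp [hv]
      · intro ha
        rcases List.mem_map.mp ha with ⟨kv, hkv, rfl⟩
        rcases List.mem_filter.mp hkv with ⟨hmem, hcond⟩
        have hc : kv.1.2 = c ∧ (0 ≤ kv.1.1 ∧ kv.1.1 < num_rows) := by
          have := hcond; simp at this; exact this
        have hget : d.get? kv.1 = some kv.2 := PySem.Dict.get?_of_mem_items d hmem hnd
        have hkey : kv.1 = (kv.1.1, c) := by
          rcases kv with ⟨⟨r', c'⟩, v'⟩; simp at hc ⊢; exact hc.1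
        refine List.mem_map.mpr ⟨kv.1.1, List.mem_filter.mpr ⟨?_, ?_⟩, ?_⟩
        · exact (PySem.List.mem_pyRange_one).mpr ⟨hc.2.1, hc.2.2⟩
        · rw [← hkey, PySem.Dict.contains_eq_isSome_get?, hget]; rfl
        · rw [← hkey, hget]; rfl
    · -- nodup of the row-driven list
      apply List.Nodup.map_on
      · intro r hr r' hr' hf
        exact hkeyinj r r' (congrArg Prod.fst hf)
      · exact (PySem.List.nodup_pyRange_one 0 num_rows).filter _
    · -- nodup of the item-driven list
      apply List.Nodup.map_on
      · intro kv hkv kv' hkv' hf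
        have h1 : kv.1.1 = kv'.1.1 := hkeyinj _ _ (congrArg Prod.fst hf)
        have hc : kv.1.2 = c := by
          have := (List.mem_filter.mp hkv).2
          simp at this; exact this.1
        have hc' : kv'.1.2 = c := by
          have := (List.mem_filter.mp hkv').2
          simp at this; exact this.1
        have hk : kv.1 = kv'.1 := by
          rcases kv with ⟨⟨r1, c1⟩, v1⟩; rcases kv' with ⟨⟨r2, c2⟩, v2⟩
          simp at h1 hc hc' ⊢; exact ⟨h1, hc.trans hc'.symm⟩
        have hnd' : (d.items.map (fun p => p.1)).Nodup := hnd
        exact List.inj_on_of_nodup_map hnd'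
          (List.mem_filter.mp hkv).1 (List.mem_filter.mp hkv').1 hk
      · have hnd' : (d.items.map (fun p => p.1)).Nodup := hnd
        exact (List.Nodup.of_map _ hnd').filter _
  unfold pvColKeyed
  by_cases hp : (i % 2 == 0) = true
  · simpa [hp] using hbase
  · simp only [hp, Bool.false_eq_true, if_false]
    exact (List.reverse_perm _).trans hbase

-- ---- keyed Perm pvT ----
theorem pvPermT (d : PySem.Dict (Int × Int) String) (hnd : d.keys.Nodup) (num_rows : Int) (col_order : List Int) :
    (pvT d num_rows col_order).Perm
      (d.items.flatMap (fun kv =>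
        if 0 ≤ kv.1.1 ∧ kv.1.1 < num_rows then
          (((PySem.List.enumerate col_order).filter (fun ic => ic.2 == kv.1.2)).map (·.1)).map
            (fun i => pvEnt num_rows i kv.1.1 kv.2)
        else [])) := by
  rw [← Multiset.coe_eq_coe]
  unfold pvT
  rw [pvMsumFlatMap, pvMsumFlatMap]
  have hL : ((PySem.List.enumerate col_order).map
        (fun ic => ((pvColKeyed d num_rows ic.1 ic.2 : List (Int × String)) : Multiset (Int × String))))
      = ((PySem.List.enumerate col_order).map
        (fun ic => (d.items.map (fun kv =>
            if kv.1.2 == ic.2 && decide (0 ≤ kv.1.1 ∧ kv.1.1 < num_rows) then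
              ({pvEnt num_rows ic.1 kv.1.1 kv.2} : Multiset (Int × String)) else 0)).sum)) := by
    apply List.map_congr_left
    intro ic _
    rw [pvColKeyed_msum d hnd num_rows ic.1 ic.2, pvMsumFilterMap]
  rw [hL, pvMsumSwap]
  apply congrArg
  apply List.map_congr_left
  intro kv _
  by_cases hr : 0 ≤ kv.1.1 ∧ kv.1.1 < num_rows
  · rw [if_pos hr, List.map_map, pvMsumFilterMap]
    apply congrArg
    apply List.map_congr_left
    intro ic _
    have hd : decide (0 ≤ kv.1.1 ∧ kv.1.1 < num_rows) = true := by simpa using hr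
    by_cases hc : kv.1.2 = ic.2
    · simp [hc, hd, Function.comp]
    · have h1 : (kv.1.2 == ic.2) = false := by simpa using hc
      have h2 : (ic.2 == kv.1.2) = false := by simpa using fun h => hc h.symm
      simp [h1, h2]
  · rw [if_neg hr]
    have hd : decide (0 ≤ kv.1.1 ∧ kv.1.1 < num_rows) = false := by simpa using hr
    simp [hd]

-- ---- pvT is strictly increasing in the key ----
theorem pvColKeyed_bounds (d : PySem.Dict (Int × Int) String) (num_rows i c : Int) :
    ∀ x ∈ pvColKeyed d num_rows i c, 0 < num_rows ∧ i * num_rows ≤ x.1 ∧ x.1 < (i + 1) * num_rows := by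
  intro x hx
  have hx' : x ∈ ((PySem.List.pyRange 0 num_rows 1).filter (fun r => d.contains (r, c))).map
      (fun r => pvEnt num_rows i r ((d.get? (r, c)).getD "")) := by
    unfold pvColKeyed at hx
    by_cases hp : (i % 2 == 0) = true
    · simpa [hp] using hx
    · simp only [hp, Bool.false_eq_true, if_false, List.mem_reverse] at hx
      exact hx
  rcases List.mem_map.mp hx' with ⟨r, hr, rfl⟩
  rcases (PySem.List.mem_pyRange_one).mp (List.mem_filter.mp hr).1 with ⟨hr0, hrn⟩
  have hmul : (i + 1) * num_rows = i * num_rows + num_rows := by ring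
  unfold pvEnt
  by_cases hp : (i % 2 == 0) = true
  · simp only [hp, if_true]
    refine ⟨by omega, by linarith, by linarith⟩
  · simp only [hp, Bool.false_eq_true, if_false]
    refine ⟨by omega, by linarith, by linarith⟩

theorem pvColKeyed_pairwise (d : PySem.Dict (Int × Int) String) (num_rows i c : Int) :
    (pvColKeyed d num_rows i c).Pairwise (fun a b => a.1 < b.1) := by
  have hfilt : ((PySem.List.pyRange 0 num_rows 1).filter (fun r => d.contains (r, c))).Pairwise (· < ·) :=
    List.Pairwise.filter _ (PySem.List.pairwise_lt_pyRange_one 0 num_rows)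
  unfold pvColKeyed
  by_cases hp : (i % 2 == 0) = true
  · simp only [hp, if_true]
    apply (List.pairwise_map).mpr
    refine hfilt.imp ?_
    intro r r' hlt
    simp [pvEnt, hp]
    omega
  · simp only [hp, Bool.false_eq_true, if_false]
    rw [List.pairwise_reverse]
    apply (List.pairwise_map).mpr
    refine hfilt.imp ?_
    intro r r' hlt
    simp [pvEnt, hp]
    omega

theorem pvT_pairwise (d : PySem.Dict (Int × Int) String) (num_rows : Int) (col_order : List Int) :
    (pvT d num_rows col_order).Pairwise (fun a b => a.1 < b.1) := by
  unfold pvT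
  rw [List.flatMap_def, List.pairwise_flatten]
  constructor
  · intro l' hl'
    rcases List.mem_map.mp hl' with ⟨ic, _, rfl⟩
    exact pvColKeyed_pairwise d num_rows ic.1 ic.2
  · apply (List.pairwise_map).mpr
    refine (PySem.List.pairwise_lt_enumerate col_order 0).imp ?_
    intro ic ic' hlt x hx y hy
    rcases pvColKeyed_bounds d num_rows ic.1 ic.2 x hx with ⟨hnr, _, hxu⟩
    rcases pvColKeyed_bounds d num_rows ic'.1 ic'.2 y hy with ⟨_, hyl, _⟩
    have hstep : (ic.1 + 1) * num_rows ≤ ic'.1 * num_rows := by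
      apply mul_le_mul_of_nonneg_right (by omega : ic.1 + 1 ≤ ic'.1) (by omega : (0:Int) ≤ num_rows)
    linarith

-- ===== VERDICT (by name: the statement is the Claim_ definition above) =====
theorem read_columns_boustrophedon_spec : Claim_equal_read_columns_boustrophedon := by
  intro grid col_order num_rows num_cols _
  unfold Spec_read_columns_boustrophedon read_columns_boustrophedon read_columns_boustrophedon_alt
  simp only [Int.reduceNeg]
  rw [pvOuter (PySem.Dict.ofList (grid.map (fun p => ((p.1, p.2.1), p.2.2)))) num_rows col_order 0 []]
  rw [pvKeyed (PySem.Dict.ofList (grid.map (fun p => ((p.1, p.2.1), p.2.2)))) num_rows col_order]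
  have hs := PySem.List.sorted_eq_of_perm_of_pairwise_lt _ _ (fun t => t.1)
    (pvPermT (PySem.Dict.ofList (grid.map (fun p => ((p.1, p.2.1), p.2.2))))
      (PySem.Dict.nodup_keys_ofList _) num_rows col_order)
    (pvT_pairwise (PySem.Dict.ofList (grid.map (fun p => ((p.1, p.2.1), p.2.2)))) num_rows col_order)
  rw [hs]
  rw [List.nil_append]
  rfl
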